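-- pv_equiv track=rewrite | github.com/lave29/language-practice | programmers/python3/level0/181864.py | solution
-- ===== SOURCE A (Python) =====
-- def solution(myString, pat):
--     answer = 0
--     temp = ''
--     for i in myString :
--         if i == 'A' :
--             temp += 'B'
--         elif i == 'B' :
--             temp += 'A'
--
--     if temp.count(pat) :
--         answer = 1
--     else :
--         answer = 0
--     return answer
-- ===== SOURCE B (Python) =====
-- def solution(myString, pat):
--     # Online NFA simulation (Morris-Pratt-style match-set automaton): stream the
--     # characters, swap A<->B on the fly, and maintain the set of partial-match
--     # lengths of pat; no swapped text is ever built and no substring scan is done.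
--     m = len(pat)
--     if m == 0:
--         return 1  # empty pattern always occurs
--     active = []  # lengths j (1 <= j < m) such that pat[:j] is a suffix of the processed text
--     for ch in myString:
--         if ch == 'A':
--             c = 'B'
--         elif ch == 'B':
--             c = 'A'
--         else:
--             continue
--         nxt = []
--         for j in active:
--             if pat[j] == c:
--                 if j + 1 == m:
--                     return 1
--                 nxt.append(j + 1)
--         if pat[0] == c:
--             if m == 1:
--                 return 1
--             nxt.append(1)
--         active = nxt
--     return 0
-- ===== Notes on version B (the rewrite author's own statement) =====
-- stated objective: alternative
-- what changed: A builds the whole A/B-swapped text and then counts occurrences of pat in it; B never materialises that text: it streams myString once, swapping each kept character on the fly, and runs an online match-set (NFA) string-matching automaton that maintains the set of partial-match lengths of pat, returning 1 as soon as a full match completes.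
import Mathlib
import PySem

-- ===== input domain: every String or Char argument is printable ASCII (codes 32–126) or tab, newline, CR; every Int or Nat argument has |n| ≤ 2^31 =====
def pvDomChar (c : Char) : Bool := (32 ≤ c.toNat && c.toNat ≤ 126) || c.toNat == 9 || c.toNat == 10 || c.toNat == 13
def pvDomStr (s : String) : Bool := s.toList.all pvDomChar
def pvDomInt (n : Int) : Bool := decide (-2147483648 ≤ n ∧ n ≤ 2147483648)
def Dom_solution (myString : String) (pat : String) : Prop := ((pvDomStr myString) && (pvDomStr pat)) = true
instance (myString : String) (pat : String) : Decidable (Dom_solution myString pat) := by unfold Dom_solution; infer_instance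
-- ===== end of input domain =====

-- B replaces A's build-the-swapped-text-then-count search by an online match-set (NFA)
-- string-matching automaton streamed over myString; same result, no text built (objective: alternative).

-- ===== PORT A =====
-- A: build temp by appending 'B' for each 'A' and 'A' for each 'B' (other chars skipped),
-- then return 1 iff temp.count(pat) is truthy (≠ 0).  Strings are handled as List Char via PySem.Chars.
def solution (myString : String) (pat : String) : Int :=
  let temp : List Char := myString.toList.foldl
    (fun t c => if c = 'A' then t ++ ['B'] else if c = 'B' then t ++ ['A'] else t) []
  if PySem.Chars.count temp pat.toList ≠ 0 then 1 else 0

-- ===== PORT B =====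
-- the 'if ch == A / elif ch == B / else continue' head of B's loop body
def pvSwapGet (ch : Char) : Option Char :=
  if ch = 'A' then some 'B' else if ch = 'B' then some 'A' else none

-- B's inner 'for j in active' loop plus the post-loop 'if pat[0] == c' check; 'none' = early
-- 'return 1'.  pat[j] is ported as getD: every index fed in is < pat.length (j < m invariant,
-- and pat[0] is only read when m ≠ 0), so getD is exact here.
def pvInner (pat : List Char) (m : Nat) (c : Char) : List Nat → List Nat → Option (List Nat)
  | [], nxt =>
      if pat.getD 0 ' ' = c then (if m = 1 then none else some (nxt ++ [1])) else some nxt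
  | j :: rest, nxt =>
      if pat.getD j ' ' = c then
        (if j + 1 = m then none else pvInner pat m c rest (nxt ++ [j + 1]))
      else pvInner pat m c rest nxt

-- B's outer 'for ch in myString' loop
def pvGo (pat : List Char) (m : Nat) : List Char → List Nat → Int
  | [], _ => 0
  | ch :: rest, active =>
      match pvSwapGet ch with
      | none => pvGo pat m rest active
      | some c =>
          match pvInner pat m c active [] with
          | none => 1
          | some nxt => pvGo pat m rest nxt

def solution_alt (myString : String) (pat : String) : Int :=
  let m := pat.length
  if m = 0 then 1 else pvGo pat.toList m myString.toList []

-- ===== PRECONDITION & SPEC =====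
def Spec_solution (myString : String) (pat : String) (out : Int) : Prop := out = solution_alt myString pat
instance (myString : String) (pat : String) (out : Int) : Decidable (Spec_solution myString pat out) := by unfold Spec_solution; infer_instance

-- ===== CLAIM (what is proved, stated in full; the proofs are below) =====
def Claim_equal_solution : Prop := ∀ (myString : String) (pat : String), Dom_solution myString pat → Spec_solution myString pat (solution myString pat)

-- ===== LEMMAS AND PROOFS =====

def pvSwap (c : Char) : Char := if c = 'A' then 'B' else if c = 'B' then 'A' else c

-- the swapped filtered text A builds ("temp"), as a function of the scanned characters
def pvProc (l : List Char) : List Char :=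
  (l.filter (fun c => c = 'A' || c = 'B')).map pvSwap

-- A's loop builds exactly pvProc of the input.
theorem pv_foldl_temp (l : List Char) (t : List Char) :
    l.foldl (fun t c => if c = 'A' then t ++ ['B'] else if c = 'B' then t ++ ['A'] else t) t
      = t ++ pvProc l := by
  induction l generalizing t with
  | nil => simp [pvProc]
  | cons h tl ih =>
    simp only [List.foldl_cons, pvProc, List.filter_cons]
    by_cases hA : h = 'A'
    · subst hA; simp [ih, pvProc, pvSwap]
    · by_cases hB : h = 'B'
      · subst hB; simp [ih, pvProc, pvSwap]
      · simp [hA, hB, ih, pvProc]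

-- Python's s.count(sub) is positive exactly when sub occurs in s.
theorem pv_count_go_pos (sub : List Char) (hsub : sub ≠ []) :
    ∀ (fuel : Nat) (l : List Char) (acc : Nat), l.length ≤ fuel →
      (0 < PySem.Chars.count.go sub fuel l acc ↔ 0 < acc ∨ sub <:+: l) := by
  intro fuel
  induction fuel with
  | zero =>
    intro l acc hl
    have : l = [] := List.eq_nil_of_length_eq_zero (Nat.le_zero.mp hl)
    subst this
    simp [PySem.Chars.count.go, List.infix_nil, hsub]
  | succ n ih =>
    intro l acc hl
    match l with
    | [] => simp [PySem.Chars.count.go, List.infix_nil, hsub]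
    | h :: t =>
      rw [PySem.Chars.count.go]
      by_cases hpre : sub.isPrefixOf (h :: t)
      · have hinf : sub <:+: h :: t :=
          ((List.isPrefixOf_iff_prefix.mp hpre)).isInfix
        have hlen : (List.drop sub.length (h :: t)).length ≤ n := by
          have h1 : 1 ≤ sub.length := by
            cases sub with | nil => exact absurd rfl hsub | cons a b => simp
          simp only [List.length_drop]
          omega
        simp only [hpre, if_true]
        rw [ih _ _ hlen]
        constructor
        · intro _; exact Or.inr hinf
        · intro _; exact Or.inl (Nat.succ_pos acc)
      · have hlen : t.length ≤ n := by
          have := hl; simp only [List.length_cons] at this; omega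
        simp only [hpre, if_false, Bool.false_eq_true]
        rw [ih _ _ hlen]
        have : sub <:+: h :: t ↔ sub <:+: t := by
          rw [List.infix_cons_iff]
          constructor
          · rintro (hp | hi)
            · exact absurd (List.isPrefixOf_iff_prefix.mpr hp) hpre
            · exact hi
          · exact Or.inr
        rw [this]

theorem pv_count_pos (s sub : List Char) :
    0 < PySem.Chars.count s sub ↔ sub <:+: s := by
  by_cases hsub : sub = []
  · subst hsub
    simp [PySem.Chars.count, List.nil_infix]
  · unfold PySem.Chars.count
    have : sub.isEmpty = false := by
      cases sub with | nil => exact absurd rfl hsub | cons a b => rfl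
    rw [this]
    simp only [Bool.false_eq_true, if_false]
    rw [pv_count_go_pos sub hsub s.length s 0 (le_refl _)]
    simp

-- appending one character on both sides of a suffix
theorem pv_suffix_snoc (xs ys : List Char) (a b : Char) :
    xs ++ [a] <:+ ys ++ [b] ↔ a = b ∧ xs <:+ ys := by
  rw [← List.reverse_prefix]
  simp only [List.reverse_append, List.reverse_cons, List.reverse_nil, List.nil_append,
    List.singleton_append, List.cons_prefix_cons, List.reverse_prefix]

-- one automaton step on the suffix-match relation
theorem pv_take_snoc (pat done : List Char) (c : Char) (j : Nat) (hj : j < pat.length) :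
    pat.take (j + 1) <:+ done ++ [c] ↔ pat.getD j ' ' = c ∧ pat.take j <:+ done := by
  have : pat.take (j + 1) = pat.take j ++ [pat.getD j ' '] := by
    rw [List.take_add_one]
    congr 1
    rw [List.getElem?_eq_getElem hj]
    simp [List.getD, List.getElem?_eq_getElem hj]
  rw [this, pv_suffix_snoc]

theorem pv_infix_snoc (pat done : List Char) (c : Char) :
    pat <:+: done ++ [c] ↔ pat <:+: done ∨ pat <:+ done ++ [c] := by
  constructor
  · intro h
    have h' : pat.reverse <:+: (done ++ [c]).reverse := h.reverse
    simp only [List.reverse_append, List.reverse_singleton, List.singleton_append] at h'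
    rcases List.infix_cons_iff.mp h' with hp | hi
    · right
      have : pat.reverse <+: (done ++ [c]).reverse := by
        simpa [List.reverse_append] using hp
      rwa [List.reverse_prefix] at this
    · left
      have := hi.reverse
      simpa using this
  · rintro (h | h)
    · exact h.trans (List.prefix_append done [c]).isInfix
    · exact h.isInfix

-- pvInner returns none exactly when this character completes a full match
theorem pv_inner_none_iff (pat : List Char) (m : Nat) (c : Char) (active nxt0 : List Nat) :
    pvInner pat m c active nxt0 = none ↔
      (∃ j ∈ active, pat.getD j ' ' = c ∧ j + 1 = m) ∨ (pat.getD 0 ' ' = c ∧ m = 1) := by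
  induction active generalizing nxt0 with
  | nil =>
    by_cases h1 : pat.getD 0 ' ' = c
    · by_cases h2 : m = 1
      · rw [pvInner, if_pos h1, if_pos h2]
        constructor
        · intro _
          exact Or.inr ⟨h1, h2⟩
        · intro _
          rfl
      · rw [pvInner, if_pos h1, if_neg h2]
        constructor
        · intro h
          simp at h
        · rintro (⟨k, hk, _⟩ | ⟨_, hm'⟩)
          · simp at hk
          · exact absurd hm' h2
    · rw [pvInner, if_neg h1]
      constructor
      · intro h
        simp at h
      · rintro (⟨k, hk, _⟩ | ⟨h0, _⟩)
        · simp at hk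
        · exact absurd h0 h1
  | cons j rest ih =>
    by_cases h1 : pat.getD j ' ' = c
    · by_cases h2 : j + 1 = m
      · rw [pvInner, if_pos h1, if_pos h2]
        constructor
        · intro _
          exact Or.inl ⟨j, List.mem_cons_self .., h1, h2⟩
        · intro _
          rfl
      · rw [pvInner, if_pos h1, if_neg h2, ih]
        constructor
        · rintro (⟨k, hk, h⟩ | h)
          · exact Or.inl ⟨k, List.mem_cons_of_mem _ hk, h⟩
          · exact Or.inr h
        · rintro (⟨k, hk, hkc, hkm⟩ | h)
          · rcases List.mem_cons.mp hk with rfl | hk'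
            · exact absurd hkm h2
            · exact Or.inl ⟨k, hk', hkc, hkm⟩
          · exact Or.inr h
    · rw [pvInner, if_neg h1, ih]
      constructor
      · rintro (⟨k, hk, h⟩ | h)
        · exact Or.inl ⟨k, List.mem_cons_of_mem _ hk, h⟩
        · exact Or.inr h
      · rintro (⟨k, hk, hkc, hkm⟩ | h)
        · rcases List.mem_cons.mp hk with rfl | hk'
          · exact absurd hkc h1
          · exact Or.inl ⟨k, hk', hkc, hkm⟩
        · exact Or.inr h

-- when pvInner returns a new active set, its members are exactly the advanced matches
theorem pv_inner_some_mem (pat : List Char) (m : Nat) (c : Char) :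
    ∀ (active nxt0 nxt : List Nat), pvInner pat m c active nxt0 = some nxt →
      ∀ k, k ∈ nxt ↔ (k ∈ nxt0 ∨ (∃ j ∈ active, pat.getD j ' ' = c ∧ k = j + 1) ∨
        (pat.getD 0 ' ' = c ∧ k = 1)) := by
  intro active
  induction active with
  | nil =>
    intro nxt0 nxt h k
    by_cases h1 : pat.getD 0 ' ' = c
    · by_cases h2 : m = 1
      · rw [pvInner, if_pos h1, if_pos h2] at h
        cases h
      · rw [pvInner, if_pos h1, if_neg h2] at h
        injection h with h
        subst h
        constructor
        · intro hk
          rcases List.mem_append.mp hk with hk | hk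
          · exact Or.inl hk
          · exact Or.inr (Or.inr ⟨h1, by simpa using hk⟩)
        · rintro (hk | ⟨i, hi, _⟩ | ⟨_, rfl⟩)
          · exact List.mem_append.mpr (Or.inl hk)
          · cases hi
          · exact List.mem_append.mpr (Or.inr (by simp))
    · rw [pvInner, if_neg h1] at h
      injection h with h
      subst h
      constructor
      · intro hk
        exact Or.inl hk
      · rintro (hk | ⟨i, hi, _⟩ | ⟨h0, _⟩)
        · exact hk
        · cases hi
        · exact absurd h0 h1
  | cons j rest ih =>
    intro nxt0 nxt h k
    by_cases h1 : pat.getD j ' ' = c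
    · by_cases h2 : j + 1 = m
      · rw [pvInner, if_pos h1, if_pos h2] at h
        cases h
      · rw [pvInner, if_pos h1, if_neg h2] at h
        rw [ih _ _ h k]
        constructor
        · rintro (hk | ⟨i, hi, hic, hki⟩ | h0)
          · rcases List.mem_append.mp hk with hk | hk
            · exact Or.inl hk
            · exact Or.inr (Or.inl ⟨j, List.mem_cons_self .., h1, by simpa using hk⟩)
          · exact Or.inr (Or.inl ⟨i, List.mem_cons_of_mem _ hi, hic, hki⟩)
          · exact Or.inr (Or.inr h0)
        · rintro (hk | ⟨i, hi, hic, hki⟩ | h0)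
          · exact Or.inl (List.mem_append.mpr (Or.inl hk))
          · rcases List.mem_cons.mp hi with rfl | hi'
            · exact Or.inl (List.mem_append.mpr (Or.inr (by simp [hki])))
            · exact Or.inr (Or.inl ⟨i, hi', hic, hki⟩)
          · exact Or.inr (Or.inr h0)
    · rw [pvInner, if_neg h1] at h
      rw [ih _ _ h k]
      constructor
      · rintro (hk | ⟨i, hi, hic, hki⟩ | h0)
        · exact Or.inl hk
        · exact Or.inr (Or.inl ⟨i, List.mem_cons_of_mem _ hi, hic, hki⟩)
        · exact Or.inr (Or.inr h0)
      · rintro (hk | ⟨i, hi, hic, hki⟩ | h0)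
        · exact Or.inl hk
        · rcases List.mem_cons.mp hi with rfl | hi'
          · exact absurd hic h1
          · exact Or.inr (Or.inl ⟨i, hi', hic, hki⟩)
        · exact Or.inr (Or.inr h0)

-- full-match condition: the next character c completes pat against done exactly when pvInner early-returns
theorem pv_full_iff (pat : List Char) (m : Nat) (hm : pat.length = m) (h1 : 1 ≤ m)
    (c : Char) (active : List Nat) (done : List Char)
    (hA : ∀ j ∈ active, 1 ≤ j ∧ j < m ∧ pat.take j <:+ done)
    (hB : ∀ j, 1 ≤ j → j < m → pat.take j <:+ done → j ∈ active) :
    (pat <:+ done ++ [c]) ↔ pvInner pat m c active [] = none := by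
  rw [pv_inner_none_iff]
  have hm1 : m - 1 < pat.length := by omega
  have hpat : pat = pat.take ((m - 1) + 1) := by
    rw [show m - 1 + 1 = m from by omega, ← hm, List.take_length]
  constructor
  · intro h
    rw [hpat, pv_take_snoc _ _ _ _ hm1] at h
    obtain ⟨hc, hsuf⟩ := h
    by_cases hm' : m = 1
    · exact Or.inr ⟨by simpa [hm'] using hc, hm'⟩
    · refine Or.inl ⟨m - 1, hB (m - 1) (by omega) (by omega) hsuf, hc, by omega⟩
  · rintro (⟨j, hj, hc, hjm⟩ | ⟨hc, hm'⟩)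
    · obtain ⟨hj1, hjlt, hsuf⟩ := hA j hj
      rw [hpat, pv_take_snoc _ _ _ _ hm1]
      exact ⟨by rwa [show m - 1 = j from by omega], by rwa [show m - 1 = j from by omega]⟩
    · rw [hpat, pv_take_snoc _ _ _ _ hm1]
      subst hm'
      exact ⟨by simpa using hc, by simp⟩

-- main loop invariant: pvGo answers whether pat occurs in done ++ pvProc rest,
-- given that active is exactly the set of proper partial-match lengths against done
theorem pv_go_correct (pat : List Char) (m : Nat) (hm : pat.length = m) (h1 : 1 ≤ m) :
    ∀ (rest : List Char) (active : List Nat) (done : List Char),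
      (∀ j ∈ active, 1 ≤ j ∧ j < m ∧ pat.take j <:+ done) →
      (∀ j, 1 ≤ j → j < m → pat.take j <:+ done → j ∈ active) →
      ¬ pat <:+: done →
      pvGo pat m rest active = if pat <:+: done ++ pvProc rest then 1 else 0 := by
  intro rest
  induction rest with
  | nil =>
    intro active done _ _ hno
    simp [pvGo, pvProc, hno]
  | cons ch rest ih =>
    intro active done hA hB hno
    rcases hsw : pvSwapGet ch with _ | c
    · -- non-A/B character: skipped by both
      have h1' : ch ≠ 'A' ∧ ch ≠ 'B' := by
        by_contra h
        rcases not_and_or.mp h with h | h <;> simp [not_not.mp h, pvSwapGet] at hsw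
      rw [show pvGo pat m (ch :: rest) active = pvGo pat m rest active from by
            simp [pvGo, hsw],
          show pvProc (ch :: rest) = pvProc rest from by simp [pvProc, h1'.1, h1'.2]]
      exact ih active done hA hB hno
    · -- A/B character, swapped to c
      have hproc : pvProc (ch :: rest) = c :: pvProc rest := by
        by_cases hchA : ch = 'A'
        · have hc : c = 'B' := by
            simp [pvSwapGet, hchA] at hsw
            exact hsw.symm
          subst hc
          simp [pvProc, hchA, pvSwap]
        · by_cases hchB : ch = 'B'
          · have hc : c = 'A' := by
              simp [pvSwapGet, hchB] at hsw
              exact hsw.symm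
            subst hc
            simp [pvProc, hchB, pvSwap]
          · simp [pvSwapGet, hchA, hchB] at hsw
      have hfull := pv_full_iff pat m hm h1 c active done hA hB
      have hsplit : done ++ pvProc (ch :: rest) = (done ++ [c]) ++ pvProc rest := by
        rw [hproc]; simp
      rcases hinner : pvInner pat m c active [] with _ | nxt
      · -- early return 1: pat just matched
        have hmatch : pat <:+ done ++ [c] := hfull.mpr hinner
        have : pat <:+: done ++ pvProc (ch :: rest) := by
          rw [hsplit]
          exact hmatch.isInfix.trans (List.prefix_append _ _).isInfix
        rw [show pvGo pat m (ch :: rest) active = 1 from by simp [pvGo, hsw, hinner],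
          if_pos this]
      · -- continue with the advanced active set
        have hnotnone : ¬ ((∃ j ∈ active, pat.getD j ' ' = c ∧ j + 1 = m) ∨
            (pat.getD 0 ' ' = c ∧ m = 1)) := by
          intro hcond
          have hn := (pv_inner_none_iff pat m c active []).mpr hcond
          rw [hinner] at hn
          cases hn
        have hmem := pv_inner_some_mem pat m c active [] nxt hinner
        have hA' : ∀ j ∈ nxt, 1 ≤ j ∧ j < m ∧ pat.take j <:+ done ++ [c] := by
          intro k hk
          rcases (hmem k).mp hk with hk0 | ⟨i, hi, hic, rfl⟩ | ⟨h0, rfl⟩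
          · simp at hk0
          · obtain ⟨hi1, hilt, hsuf⟩ := hA i hi
            have hne : i + 1 ≠ m := fun h => hnotnone (Or.inl ⟨i, hi, hic, h⟩)
            refine ⟨by omega, by omega, ?_⟩
            rw [pv_take_snoc _ _ _ _ (by omega)]
            exact ⟨hic, hsuf⟩
          · have hne : m ≠ 1 := fun h => hnotnone (Or.inr ⟨h0, h⟩)
            refine ⟨le_refl _, by omega, ?_⟩
            rw [show (1 : Nat) = 0 + 1 from rfl, pv_take_snoc _ _ _ _ (by omega)]
            exact ⟨h0, by simp⟩
        have hB' : ∀ j, 1 ≤ j → j < m → pat.take j <:+ done ++ [c] → j ∈ nxt := by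
          intro j hj1 hjm hsuf
          rw [show j = (j - 1) + 1 from by omega, pv_take_snoc _ _ _ _ (by omega)] at hsuf
          obtain ⟨hc', hsuf'⟩ := hsuf
          rcases Nat.eq_zero_or_pos (j - 1) with hz | hp
          · refine (hmem j).mpr (Or.inr (Or.inr ⟨by rwa [← hz], by omega⟩))
          · refine (hmem j).mpr (Or.inr (Or.inl ⟨j - 1, hB (j - 1) hp (by omega) hsuf', hc', by omega⟩))
        have hno' : ¬ pat <:+: done ++ [c] := by
          rw [pv_infix_snoc]
          rintro (h | h)
          · exact hno h
          · rw [hfull] at h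
            simp [h] at hinner
        rw [show pvGo pat m (ch :: rest) active = pvGo pat m rest nxt from by
              simp [pvGo, hsw, hinner],
            hsplit]
        exact ih nxt (done ++ [c]) hA' hB' hno'

-- ===== VERDICT (by name: the statement is the Claim_ definition above) =====
theorem solution_spec : Claim_equal_solution := by
  intro myString pat _
  unfold Spec_solution solution solution_alt
  rw [pv_foldl_temp, List.nil_append]
  by_cases hm : pat.length = 0
  · have hpat : pat.toList = [] := by
      cases h : pat.toList with
      | nil => rfl
      | cons a l => rw [← String.length_toList, h] at hm; simp at hm
    have hcnt : 0 < PySem.Chars.count (pvProc myString.toList) pat.toList := by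
      rw [pv_count_pos, hpat]
      exact List.nil_infix
    rw [if_pos (show PySem.Chars.count (pvProc myString.toList) pat.toList ≠ 0 from by omega)]
    simp [hm]
  · have h1 : 1 ≤ pat.length := by omega
    have hlen : pat.toList.length = pat.length := String.length_toList ▸ rfl
    rw [if_neg hm,
      pv_go_correct pat.toList pat.length hlen h1 myString.toList [] []
        (by simp)
        (by
          intro j hj1 hjm hsuf
          have := List.suffix_nil.mp hsuf
          have : (pat.toList.take j).length = 0 := by rw [this]; rfl
          rw [List.length_take] at this
          omega)
        (by
          intro h
          have := List.eq_nil_of_infix_nil h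
          rw [← hlen, this] at h1
          simp at h1),
      List.nil_append]
    by_cases hin : pat.toList <:+: pvProc myString.toList
    · have hcnt : 0 < PySem.Chars.count (pvProc myString.toList) pat.toList :=
        (pv_count_pos _ _).mpr hin
      rw [if_pos hin, if_pos (by omega)]
    · have hcnt : ¬ 0 < PySem.Chars.count (pvProc myString.toList) pat.toList :=
        fun h => hin ((pv_count_pos _ _).mp h)
      rw [if_neg hin, if_neg (by omega)]
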